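-- pv_equiv track=rewrite | github.com/Alexrdj11/rubics_cube | utils.py | validate_moves_sequence
-- ===== SOURCE A (Python) =====
-- def validate_moves_sequence(moves):
--     """Validate that a move sequence contains only legal moves.
--
--     Args:
--         moves: String of moves separated by spaces
--
--     Returns:
--         bool: True if all moves are valid, False otherwise
--     """
--     valid_moves = [
--         "U", "U'", "U2", "D", "D'", "D2",
--         "R", "R'", "R2", "L", "L'", "L2",
--         "F", "F'", "F2", "B", "B'", "B2",
--         "M", "M'", "M2", "E", "E'", "E2",
--         "S", "S'", "S2"
--     ]
--
--     move_list = moves.strip().split()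
--
--     return all(move in valid_moves for move in move_list)
-- ===== SOURCE B (Python) =====
-- def validate_moves_sequence(moves):
--     """Validate that a move sequence contains only legal moves (face + optional modifier)."""
--     faces = set("UDRLFBMES")
--     modifiers = {"", "'", "2"}
--     return all(m[0] in faces and m[1:] in modifiers for m in moves.strip().split())
-- ===== Notes on version B (the rewrite author's own statement) =====
-- stated objective: idiomatic
-- what changed: Replaces A's enumerated 27-entry valid-move table (a list-membership test per token) with a structural parse of each token: first character in a 9-element face set and the remaining slice in the 3-element modifier set.
import Mathlib
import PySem

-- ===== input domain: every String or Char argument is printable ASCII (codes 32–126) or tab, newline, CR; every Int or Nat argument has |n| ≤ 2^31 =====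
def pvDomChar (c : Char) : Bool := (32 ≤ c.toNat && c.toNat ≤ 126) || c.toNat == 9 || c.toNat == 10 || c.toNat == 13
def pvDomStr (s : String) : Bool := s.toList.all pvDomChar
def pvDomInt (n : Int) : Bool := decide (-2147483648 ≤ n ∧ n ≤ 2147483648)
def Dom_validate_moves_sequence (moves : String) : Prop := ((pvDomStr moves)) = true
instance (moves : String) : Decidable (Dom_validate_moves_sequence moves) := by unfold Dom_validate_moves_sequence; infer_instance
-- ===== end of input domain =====

-- B replaces A's enumerated 27-entry lookup table by a structural parse of each token
-- into a face letter plus an optional modifier (idiomatic; return value only, no side effects).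

-- ===== PORT A =====
def pvValidMoves : List String :=
  ["U", "U'", "U2", "D", "D'", "D2",
   "R", "R'", "R2", "L", "L'", "L2",
   "F", "F'", "F2", "B", "B'", "B2",
   "M", "M'", "M2", "E", "E'", "E2",
   "S", "S'", "S2"]

def validate_moves_sequence (moves : String) : Bool :=
  -- move_list = moves.strip().split(); all(move in valid_moves for move in move_list)
  (PySem.Str.split₀ (PySem.Str.strip moves)).all (fun move => pvValidMoves.contains move)

-- ===== PORT B =====
def pvFaces : PySem.Set Char := PySem.Set.ofList "UDRLFBMES".toList      -- set("UDRLFBMES")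
def pvModifiers : PySem.Set String := PySem.Set.ofList ["", "'", "2"]    -- {"", "'", "2"}

def validate_moves_sequence_alt (moves : String) : Bool :=
  (PySem.Str.split₀ (PySem.Str.strip moves)).all (fun m =>
    -- m[0]: the `none` branch is Python's IndexError; unreachable, split() yields no empty token
    (match PySem.Str.pyGet? m 0 with
     | some c => pvFaces.contains c
     | none => false)
    && pvModifiers.contains (PySem.Str.slice m (some 1) none))

-- ===== PRECONDITION & SPEC =====
def Spec_validate_moves_sequence (moves : String) (out : Bool) : Prop := out = validate_moves_sequence_alt moves
instance (moves : String) (out : Bool) : Decidable (Spec_validate_moves_sequence moves out) := by unfold Spec_validate_moves_sequence; infer_instance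

-- ===== CLAIM (what is proved, stated in full; the proofs are below) =====
def Claim_equal_validate_moves_sequence : Prop := ∀ (moves : String), Dom_validate_moves_sequence moves → Spec_validate_moves_sequence moves (validate_moves_sequence moves)

-- ===== LEMMAS AND PROOFS =====

-- Per-token equivalence: a string is one of the 27 table entries iff its first character is a
-- face letter and the rest of it is one of the three modifiers. Holds for EVERY string.
set_option maxHeartbeats 2000000 in
lemma pv_tok (m : String) :
    pvValidMoves.contains m =
      ((match PySem.Str.pyGet? m 0 with
        | some c => pvFaces.contains c
        | none => false)
       && pvModifiers.contains (PySem.Str.slice m (some 1) none)) := by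
  rw [Bool.eq_iff_iff]
  rcases hm : m.toList with _ | ⟨c, _ | ⟨d, rest⟩⟩
  · simp [pvValidMoves, List.contains_eq_mem, String.ext_iff, hm,
      PySem.Str.pyGet?, PySem.Chars.pyGet?_eq_listPyGet?, PySem.List.pyGet?]
  · simp [pvValidMoves, pvFaces, pvModifiers, List.contains_eq_mem, String.ext_iff, hm,
      PySem.Str.pyGet?, PySem.Chars.pyGet?_eq_listPyGet?,
      PySem.Set.contains_eq_listContains, PySem.Str.toList_slice, PySem.List.slice]
  · cases rest with
    | cons e r =>
      simp [pvValidMoves, pvFaces, pvModifiers, List.contains_eq_mem, String.ext_iff, hm,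
        PySem.Str.pyGet?, PySem.Chars.pyGet?_eq_listPyGet?,
        PySem.Set.contains_eq_listContains, PySem.Str.toList_slice, PySem.List.slice]
    | nil =>
      simp [pvValidMoves, pvFaces, pvModifiers, List.contains_eq_mem, String.ext_iff, hm,
        PySem.Str.pyGet?, PySem.Chars.pyGet?_eq_listPyGet?,
        PySem.Set.contains_eq_listContains, PySem.Str.toList_slice, PySem.List.slice]
      constructor
      · rintro (⟨rfl,rfl⟩|⟨rfl,rfl⟩|⟨rfl,rfl⟩|⟨rfl,rfl⟩|⟨rfl,rfl⟩|⟨rfl,rfl⟩|⟨rfl,rfl⟩|⟨rfl,rfl⟩|⟨rfl,rfl⟩|⟨rfl,rfl⟩|⟨rfl,rfl⟩|⟨rfl,rfl⟩|⟨rfl,rfl⟩|⟨rfl,rfl⟩|⟨rfl,rfl⟩|⟨rfl,rfl⟩|⟨rfl,rfl⟩|⟨rfl,rfl⟩) <;> simp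
      · rintro ⟨rfl|rfl|rfl|rfl|rfl|rfl|rfl|rfl|rfl, rfl|rfl⟩ <;> simp

-- ===== VERDICT (by name: the statement is the Claim_ definition above) =====
theorem validate_moves_sequence_spec : Claim_equal_validate_moves_sequence := by
  intro moves _
  unfold Spec_validate_moves_sequence validate_moves_sequence validate_moves_sequence_alt
  exact congrArg ((PySem.Str.split₀ (PySem.Str.strip moves)).all) (funext pv_tok)
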